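-- pv_equiv track=rewrite | github.com/jparish1977/telnet-dungeon | dungeon/guild/apprentice.py | _find_nearest_open
-- ===== SOURCE A (Python) =====
-- def _find_nearest_open(grid, x, y, max_search=10):
--     """Find the nearest walkable tile to (x,y). Returns (nx, ny) or None."""
--     size = len(grid)
--     walkable = {0, 2, 3, 4, 5, 6}
--     for radius in range(1, max_search + 1):
--         for dy in range(-radius, radius + 1):
--             for dx in range(-radius, radius + 1):
--                 if abs(dx) != radius and abs(dy) != radius:
--                     continue  # only check the perimeter of each ring
--                 nx, ny = x + dx, y + dy
--                 if 0 < nx < size - 1 and 0 < ny < size - 1: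
--                     if grid[ny][nx] in walkable:
--                         return nx, ny
--     return None
-- ===== SOURCE B (Python) =====
-- def _find_nearest_open(grid, x, y, max_search=10):
--     """Find the nearest walkable tile to (x,y). Returns (nx, ny) or None.
--
--     Flat formulation: enumerate every offset of the search square once
--     (row-major, centre excluded), stable-sort the list by Chebyshev
--     distance -- stability keeps the (dy, dx) row-major tie-break -- and
--     scan it in a single pass.
--     """
--     size = len(grid)
--     walkable = {0, 2, 3, 4, 5, 6}
--     offsets = [(dx, dy)
--                for dy in range(-max_search, max_search + 1)
--                for dx in range(-max_search, max_search + 1)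
--                if dx != 0 or dy != 0]
--     offsets.sort(key=lambda o: max(abs(o[0]), abs(o[1])))
--     for dx, dy in offsets:
--         nx, ny = x + dx, y + dy
--         if 0 < nx < size - 1 and 0 < ny < size - 1 and grid[ny][nx] in walkable:
--             return nx, ny
--     return None
-- ===== Notes on version B (the rewrite author's own statement) =====
-- stated objective: alternative
-- what changed: Replaces A's nested radius/dy/dx loops with a flat formulation: enumerate every offset of the search square once, stable-sort the list by Chebyshev distance (stability preserves the (dy, dx) row-major tie-break), and scan it in a single pass.
-- outside the precondition, e.g. on _find_nearest_open([[9, 9, 9], [0], [9, 9, 9]], 1, 0, 1): A raises IndexError, B raises IndexError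
import Mathlib
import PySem

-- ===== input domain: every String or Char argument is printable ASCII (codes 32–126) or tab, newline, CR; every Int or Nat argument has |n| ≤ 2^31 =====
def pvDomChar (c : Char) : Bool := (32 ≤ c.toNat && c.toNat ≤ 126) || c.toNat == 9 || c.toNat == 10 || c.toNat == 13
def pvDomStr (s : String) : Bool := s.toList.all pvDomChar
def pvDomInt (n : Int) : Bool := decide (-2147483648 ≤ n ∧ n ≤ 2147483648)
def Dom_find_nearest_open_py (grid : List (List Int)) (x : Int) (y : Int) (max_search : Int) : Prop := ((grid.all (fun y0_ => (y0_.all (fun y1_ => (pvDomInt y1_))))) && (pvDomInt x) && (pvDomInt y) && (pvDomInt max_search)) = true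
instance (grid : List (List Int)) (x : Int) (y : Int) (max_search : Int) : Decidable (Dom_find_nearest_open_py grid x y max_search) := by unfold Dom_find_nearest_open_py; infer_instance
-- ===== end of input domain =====

-- B flattens the search: it enumerates every offset of the square once, stable-sorts the flat
-- list by Chebyshev distance (stability keeps the (dy, dx) row-major tie-break) and scans it in
-- a single pass, instead of A's nested radius/dy/dx loops with a perimeter 'continue' filter
-- (objective: alternative decomposition).
-- Both programs raise IndexError on ragged grids (rows shorter than the indices reached); Pre_ excludes those.

-- ===== PORT A =====
-- the body of one iteration of 'for radius in ...' (the two inner loops, with the 'continue')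
def pvARing (grid : List (List Int)) (x : Int) (y : Int) (radius : Int) : Option (Int × Int) :=
  let size : Int := grid.length
  let walkable : PySem.Set Int := PySem.Set.ofList [0, 2, 3, 4, 5, 6]
  (PySem.List.pyRange (-radius) (radius + 1) 1).findSome? (fun dy =>
    (PySem.List.pyRange (-radius) (radius + 1) 1).findSome? (fun dx =>
      if |dx| ≠ radius ∧ |dy| ≠ radius then none   -- continue: only check the perimeter of each ring
      else
        let nx := x + dx
        let ny := y + dy
        if 0 < nx ∧ nx < size - 1 ∧ 0 < ny ∧ ny < size - 1 then
          match (PySem.List.pyGet? grid ny).bind (fun row => PySem.List.pyGet? row nx) with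
          | some v => if v ∈ walkable then some (nx, ny) else none
          | none => none   -- IndexError in Python; excluded by Pre_
        else none))

-- 'for radius in range(1, max_search + 1)' with early return
def pvALoop (grid : List (List Int)) (x : Int) (y : Int) (radius : Int) (fuel : Nat) : Option (Int × Int) :=
  match fuel with
  | 0 => none
  | Nat.succ f =>
    match pvARing grid x y radius with
    | some p => some p
    | none => pvALoop grid x y (radius + 1) f

def find_nearest_open_py (grid : List (List Int)) (x : Int) (y : Int) (max_search : Int) : Option (Int × Int) :=
  pvALoop grid x y 1 max_search.toNat

-- ===== PORT B =====
def find_nearest_open_py_alt (grid : List (List Int)) (x : Int) (y : Int) (max_search : Int) : Option (Int × Int) :=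
  let size : Int := grid.length
  let walkable : PySem.Set Int := PySem.Set.ofList [0, 2, 3, 4, 5, 6]
  let offsets : List (Int × Int) :=
    (PySem.List.pyRange (-max_search) (max_search + 1) 1).flatMap (fun dy =>
      ((PySem.List.pyRange (-max_search) (max_search + 1) 1).filter
          (fun dx => decide (dx ≠ 0 ∨ dy ≠ 0))).map (fun dx => (dx, dy)))
  -- offsets.sort(key=lambda o: max(abs(o[0]), abs(o[1]))): Python's list.sort is a STABLE
  -- sort; ported as Lean's stable stdlib sort List.mergeSort (same stable-sort contract)
  (offsets.mergeSort (fun o p => decide (max |o.1| |o.2| ≤ max |p.1| |p.2|))).findSome? (fun o =>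
    let nx := x + o.1
    let ny := y + o.2
    if 0 < nx ∧ nx < size - 1 ∧ 0 < ny ∧ ny < size - 1 then
      match (PySem.List.pyGet? grid ny).bind (fun row => PySem.List.pyGet? row nx) with
      | some v => if v ∈ walkable then some (nx, ny) else none
      | none => none   -- IndexError in Python; excluded by Pre_
    else none)

-- ===== PRECONDITION & SPEC =====
-- Pre_ excludes ragged grids on which an in-bounds row the search can reach (index 0 < i < len(grid)-1
-- within max_search of y, with some reachable column) is too short for the columns the search can touch:
-- there Python's grid[ny][nx] can raise IndexError (both A and B probe cells under the same bounds check).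
def Pre_find_nearest_open_py (grid : List (List Int)) (x : Int) (y : Int) (max_search : Int) : Prop :=
  ∀ i ∈ List.range grid.length,
    (0 < i ∧ (i : Int) < (grid.length : Int) - 1 ∧ y - max_search ≤ (i : Int) ∧
      (i : Int) ≤ y + max_search ∧ x - max_search ≤ (grid.length : Int) - 2 ∧ 1 ≤ x + max_search) →
    min ((grid.length : Int) - 2) (x + max_search) < ((grid.getD i []).length : Int)
instance (grid : List (List Int)) (x : Int) (y : Int) (max_search : Int) : Decidable (Pre_find_nearest_open_py grid x y max_search) := by unfold Pre_find_nearest_open_py; infer_instance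
def pvWitness_find_nearest_open_py : List (List Int) × Int × Int × Int :=
  ([[1, 1, 1], [1, 0, 1], [1, 1, 1]], 1, 1, 2)

def Spec_find_nearest_open_py (grid : List (List Int)) (x : Int) (y : Int) (max_search : Int) (out : Option (Int × Int)) : Prop := out = find_nearest_open_py_alt grid x y max_search
instance (grid : List (List Int)) (x : Int) (y : Int) (max_search : Int) (out : Option (Int × Int)) : Decidable (Spec_find_nearest_open_py grid x y max_search out) := by unfold Spec_find_nearest_open_py; infer_instance

-- ===== CLAIM (what is proved, stated in full; the proofs are below) =====
def Claim_equal_find_nearest_open_py : Prop := ∀ (grid : List (List Int)) (x : Int) (y : Int) (max_search : Int), Dom_find_nearest_open_py grid x y max_search → Pre_find_nearest_open_py grid x y max_search → Spec_find_nearest_open_py grid x y max_search (find_nearest_open_py grid x y max_search)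

-- ===== LEMMAS AND PROOFS =====

-- the shared cell test (bounds check + walkability at (x+dx, y+dy))
def pvCheck (grid : List (List Int)) (x : Int) (y : Int) (o : Int × Int) : Option (Int × Int) :=
  let nx := x + o.1
  let ny := y + o.2
  if 0 < nx ∧ nx < (grid.length : Int) - 1 ∧ 0 < ny ∧ ny < (grid.length : Int) - 1 then
    match (PySem.List.pyGet? grid ny).bind (fun row => PySem.List.pyGet? row nx) with
    | some v => if v ∈ PySem.Set.ofList [0, 2, 3, 4, 5, 6] then some (nx, ny) else none
    | none => none
  else none

-- A's ring-r perimeter, in A's (dy, dx) scan order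
def pvPerimA (r : Int) : List (Int × Int) :=
  (PySem.List.pyRange (-r) (r + 1) 1).flatMap (fun dy =>
    ((PySem.List.pyRange (-r) (r + 1) 1).filter
        (fun dx => !(decide (|dx| ≠ r ∧ |dy| ≠ r)))).map (fun dx => (dx, dy)))

-- B's unsorted offset list
def pvOffsets (m : Int) : List (Int × Int) :=
  (PySem.List.pyRange (-m) (m + 1) 1).flatMap (fun dy =>
    ((PySem.List.pyRange (-m) (m + 1) 1).filter
        (fun dx => decide (dx ≠ 0 ∨ dy ≠ 0))).map (fun dx => (dx, dy)))

def pvKey (o : Int × Int) : Int := max |o.1| |o.2|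

-- generic list lemmas ---------------------------------------------------------

lemma pvFindSome?_congr {α γ : Type} (l : List α) (f g : α → Option γ)
    (h : ∀ x ∈ l, f x = g x) : l.findSome? f = l.findSome? g := by
  induction l with
  | nil => rfl
  | cons a t ih =>
    simp only [List.findSome?_cons, h a (by simp)]
    cases g a <;> simp [ih (fun x hx => h x (by simp [hx]))]

lemma pvFindSome?_flatMap {α β γ : Type} (l : List α) (g : α → List β) (f : β → Option γ) :
    (l.flatMap g).findSome? f = l.findSome? (fun a => (g a).findSome? f) := by
  induction l with
  | nil => rfl
  | cons a t ih =>
    simp only [List.flatMap_cons, List.findSome?_append, List.findSome?_cons, ih]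
    cases (g a).findSome? f <;> simp [Option.or]

-- 'continue' inside a loop with early return: findSome? over the filtered list
lemma pvFindSome?_if {α γ : Type} (l : List α) (p : α → Prop) [DecidablePred p]
    (g : α → Option γ) :
    l.findSome? (fun a => if p a then none else g a) =
      (l.filter (fun a => !(decide (p a)))).findSome? g := by
  induction l with
  | nil => rfl
  | cons a t ih =>
    by_cases h : p a <;> simp [List.findSome?_cons, h, ih]

lemma pvFlatMapCongr {α β : Type} (l : List α) (f g : α → List β)
    (h : ∀ a ∈ l, f a = g a) : l.flatMap f = l.flatMap g := by
  induction l with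
  | nil => rfl
  | cons a t ih =>
    simp only [List.flatMap_cons, h a (by simp), ih (fun x hx => h x (by simp [hx]))]

-- two Pairwise-R lists of an asymmetric relation with the same members are equal
lemma pvEqOfMemPairwiseRel {α : Type} (R : α → α → Prop) (hasym : ∀ a b, R a b → ¬ R b a) :
    ∀ (l₁ l₂ : List α), l₁.Pairwise R → l₂.Pairwise R → (∀ a, a ∈ l₁ ↔ a ∈ l₂) → l₁ = l₂ := by
  intro l₁
  induction l₁ with
  | nil =>
    intro l₂ _ _ hm
    cases l₂ with
    | nil => rfl
    | cons b t₂ => exact absurd ((hm b).mpr (by simp)) (by simp)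
  | cons a t ih =>
    intro l₂ h₁ h₂ hm
    cases l₂ with
    | nil => exact absurd ((hm a).mp (by simp)) (by simp)
    | cons b t₂ =>
      obtain ⟨ha1, ha2⟩ := List.pairwise_cons.mp h₁
      obtain ⟨hb1, hb2⟩ := List.pairwise_cons.mp h₂
      by_cases hab : a = b
      · subst hab
        have : t = t₂ := by
          apply ih t₂ ha2 hb2
          intro x
          constructor
          · intro hx
            have hRx := ha1 x hx
            have : x ∈ a :: t₂ := (hm x).mp (by simp [hx])
            rcases List.mem_cons.mp this with h | h
            · subst h; exact absurd hRx (hasym x x hRx)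
            · exact h
          · intro hx
            have hRx := hb1 x hx
            have : x ∈ a :: t := (hm x).mpr (by simp [hx])
            rcases List.mem_cons.mp this with h | h
            · subst h; exact absurd hRx (hasym x x hRx)
            · exact h
        rw [this]
      · exfalso
        have hat : a ∈ t₂ := by
          rcases List.mem_cons.mp ((hm a).mp (by simp)) with h | h
          · exact absurd h hab
          · exact h
        have hbt : b ∈ t := by
          rcases List.mem_cons.mp ((hm b).mpr (by simp)) with h | h
          · exact absurd h.symm hab
          · exact h
        exact hasym a b (ha1 b hbt) (hb1 a hat)

-- stability of the sort --------------------------------------------------------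

-- a partition split of a list by a threshold predicate is unique
lemma pvSplitUnique {α : Type} (p : α → Prop) :
    ∀ (a b c d : List α), a ++ b = c ++ d → (∀ x ∈ a, p x) → (∀ x ∈ b, ¬ p x) →
      (∀ x ∈ c, p x) → (∀ x ∈ d, ¬ p x) → a = c ∧ b = d := by
  intro a
  induction a with
  | nil =>
    intro b c d habcd _ hb hc _
    cases c with
    | nil => simpa using habcd
    | cons z c' =>
      exfalso
      have : z ∈ b := by rw [List.nil_append] at habcd; rw [habcd]; simp
      exact hb z this (hc z (by simp))
  | cons x a' ih =>
    intro b c d habcd ha hb hc hd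
    cases c with
    | nil =>
      exfalso
      have : x ∈ d := by rw [List.nil_append] at habcd; rw [← habcd]; simp
      exact hd x this (ha x (by simp))
    | cons z c' =>
      simp only [List.cons_append, List.cons.injEq] at habcd
      obtain ⟨rfl, h2⟩ := habcd
      obtain ⟨e1, e2⟩ := ih b c' d h2 (fun t ht => ha t (by simp [ht])) hb
        (fun t ht => hc t (by simp [ht])) hd
      exact ⟨by rw [e1], e2⟩

-- a strictly increasing key list splits at any member
lemma pvKsSplit (ks : List Int) (hks : ks.Pairwise (· < ·)) (kx : Int) (h : kx ∈ ks) :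
    ∃ ksl ksg, ks = ksl ++ kx :: ksg ∧ (∀ k ∈ ksl, k < kx) ∧ (∀ k ∈ ksg, kx < k) := by
  obtain ⟨ksl, ksg, rfl⟩ := List.append_of_mem h
  rw [List.pairwise_append] at hks
  obtain ⟨_, h2, h3⟩ := hks
  exact ⟨ksl, ksg, rfl, fun k hk => h3 k hk kx (by simp),
    fun k hk => (List.pairwise_cons.mp h2).1 k hk⟩

-- the stable sort of a list whose keys all lie in the strictly increasing list ks
-- is the concatenation of its key-groups in ks order
lemma pvMergeSort_grouped {α : Type} (key : α → Int) (ks : List Int)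
    (hks : ks.Pairwise (· < ·)) :
    ∀ (xs : List α), (∀ a ∈ xs, key a ∈ ks) →
      xs.mergeSort (fun a b => decide (key a ≤ key b)) =
        ks.flatMap (fun k => xs.filter (fun a => decide (key a = k))) := by
  have htrans : ∀ (a b c : α), decide (key a ≤ key b) = true → decide (key b ≤ key c) = true →
      decide (key a ≤ key c) = true := by intro a b c h1 h2; simp at h1 h2 ⊢; omega
  have htotal : ∀ (a b : α), (decide (key a ≤ key b) || decide (key b ≤ key a)) = true := by
    intro a b; simp; omega
  intro xs
  induction xs with
  | nil => intro _; simp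
  | cons x l ih =>
    intro hcov
    obtain ⟨l₁, l₂, h1, h2, h3⟩ := List.mergeSort_cons htrans htotal x l
    have hIH : l₁ ++ l₂ = ks.flatMap (fun k => l.filter (fun a => decide (key a = k))) := by
      rw [← h2]; exact ih (fun a ha => hcov a (by simp [ha]))
    obtain ⟨ksl, ksg, hkeq, hl, hg⟩ := pvKsSplit ks hks (key x) (hcov x (by simp))
    -- elements after x in the sorted list have key ≥ key x; those in l₁ have key < key x
    have hsorted := List.pairwise_mergeSort htrans htotal (x :: l)
    rw [h1, List.pairwise_append] at hsorted
    have hl₂ : ∀ b ∈ l₂, key x ≤ key b := by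
      intro b hb
      have := (List.pairwise_cons.mp hsorted.2.1).1 b hb
      simpa using this
    have hl₁ : ∀ b ∈ l₁, key b < key x := by
      intro b hb
      have := h3 b hb
      simp at this
      omega
    -- split the grouped form of l at key x
    have hgrp : ks.flatMap (fun k => l.filter (fun a => decide (key a = k))) =
        ksl.flatMap (fun k => l.filter (fun a => decide (key a = k))) ++
          (l.filter (fun a => decide (key a = key x)) ++
            ksg.flatMap (fun k => l.filter (fun a => decide (key a = k)))) := by
      rw [hkeq, List.flatMap_append, List.flatMap_cons]
    have hsplit := pvSplitUnique (fun a => key a < key x) l₁ l₂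
      (ksl.flatMap (fun k => l.filter (fun a => decide (key a = k))))
      (l.filter (fun a => decide (key a = key x)) ++
        ksg.flatMap (fun k => l.filter (fun a => decide (key a = k))))
      (by rw [hIH, hgrp])
      hl₁ (fun b hb => by have := hl₂ b hb; omega)
      (by
        intro b hb
        obtain ⟨k, hk, hbk⟩ := List.mem_flatMap.mp hb
        have := (List.mem_filter.mp hbk).2
        simp at this
        have := hl k hk
        omega)
      (by
        intro b hb
        rcases List.mem_append.mp hb with hb | hb
        · have := (List.mem_filter.mp hb).2
          simp at this
          omega
        · obtain ⟨k, hk, hbk⟩ := List.mem_flatMap.mp hb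
          have := (List.mem_filter.mp hbk).2
          simp at this
          have := hg k hk
          omega)
    -- the grouped form of x :: l
    have hx : ∀ k, k ≠ key x →
        (x :: l).filter (fun a => decide (key a = k)) = l.filter (fun a => decide (key a = k)) := by
      intro k hk
      rw [List.filter_cons]
      simp [Ne.symm hk]
    rw [h1, hkeq, List.flatMap_append, List.flatMap_cons]
    rw [List.flatMap_congr (fun k hk => hx k (by have := hl k hk; omega)),
      List.flatMap_congr (fun k hk => hx k (by have := hg k hk; omega))]
    rw [show (x :: l).filter (fun a => decide (key a = key x)) =
        x :: l.filter (fun a => decide (key a = key x)) from by rw [List.filter_cons]; simp]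
    rw [hsplit.1, hsplit.2]
    simp

-- the offset lists -------------------------------------------------------------

-- row-major (dy, then dx) order
def pvLex (a b : Int × Int) : Prop := a.2 < b.2 ∨ (a.2 = b.2 ∧ a.1 < b.1)

lemma pvLex_asym : ∀ a b, pvLex a b → ¬ pvLex b a := by
  intro a b h1 h2
  unfold pvLex at h1 h2
  omega

lemma pvPairwiseLex_row (l : List Int) (dy : Int) (h : l.Pairwise (· < ·)) :
    (l.map (fun dx => (dx, dy))).Pairwise pvLex := by
  rw [List.pairwise_map]
  exact h.imp (fun hlt => Or.inr ⟨rfl, hlt⟩)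

lemma pvPairwiseLex_flat (l : List Int) (f : Int → List Int) (hl : l.Pairwise (· < ·))
    (hf : ∀ dy, (f dy).Pairwise (· < ·)) :
    (l.flatMap (fun dy => (f dy).map (fun dx => (dx, dy)))).Pairwise pvLex := by
  rw [List.pairwise_flatMap]
  constructor
  · intro dy _; exact pvPairwiseLex_row (f dy) dy (hf dy)
  · refine hl.imp (fun {dy₁ dy₂} hlt => ?_)
    intro p hp q hq
    obtain ⟨dx₁, _, rfl⟩ := List.mem_map.mp hp
    obtain ⟨dx₂, _, rfl⟩ := List.mem_map.mp hq
    exact Or.inl hlt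

lemma pvPairwiseLex_offsets (m : Int) : (pvOffsets m).Pairwise pvLex := by
  apply pvPairwiseLex_flat
  · exact PySem.List.pairwise_lt_pyRange_one _ _
  · intro dy; exact List.Pairwise.filter _ (PySem.List.pairwise_lt_pyRange_one _ _)

lemma pvPairwiseLex_perim (r : Int) : (pvPerimA r).Pairwise pvLex := by
  apply pvPairwiseLex_flat
  · exact PySem.List.pairwise_lt_pyRange_one _ _
  · intro dy; exact List.Pairwise.filter _ (PySem.List.pairwise_lt_pyRange_one _ _)

lemma pvMem_offsets (m dx dy : Int) :
    (dx, dy) ∈ pvOffsets m ↔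
      (-m ≤ dx ∧ dx < m + 1 ∧ -m ≤ dy ∧ dy < m + 1 ∧ (dx ≠ 0 ∨ dy ≠ 0)) := by
  unfold pvOffsets
  constructor
  · intro h
    obtain ⟨dy', hdy, h⟩ := List.mem_flatMap.mp h
    obtain ⟨dx', hdx, heq⟩ := List.mem_map.mp h
    have h1 : dx' = dx := congrArg Prod.fst heq
    have h2 : dy' = dy := congrArg Prod.snd heq
    rw [h1, h2] at hdx
    rw [h2] at hdy
    obtain ⟨hdx1, hdx2⟩ := List.mem_filter.mp hdx
    have hb1 := PySem.List.mem_pyRange_one.mp hdy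
    have hb2 := PySem.List.mem_pyRange_one.mp hdx1
    simp only [decide_eq_true_eq] at hdx2
    exact ⟨hb2.1, hb2.2, hb1.1, hb1.2, hdx2⟩
  · rintro ⟨h1, h2, h3, h4, h5⟩
    apply List.mem_flatMap.mpr
    refine ⟨dy, PySem.List.mem_pyRange_one.mpr ⟨h3, h4⟩, ?_⟩
    apply List.mem_map.mpr
    refine ⟨dx, List.mem_filter.mpr ⟨PySem.List.mem_pyRange_one.mpr ⟨h1, h2⟩, by
      simp only [decide_eq_true_eq]; exact h5⟩, rfl⟩

lemma pvMem_perim (r dx dy : Int) :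
    (dx, dy) ∈ pvPerimA r ↔
      (-r ≤ dx ∧ dx < r + 1 ∧ -r ≤ dy ∧ dy < r + 1 ∧ (|dx| = r ∨ |dy| = r)) := by
  unfold pvPerimA
  constructor
  · intro h
    obtain ⟨dy', hdy, h⟩ := List.mem_flatMap.mp h
    obtain ⟨dx', hdx, heq⟩ := List.mem_map.mp h
    have h1 : dx' = dx := congrArg Prod.fst heq
    have h2 : dy' = dy := congrArg Prod.snd heq
    rw [h1, h2] at hdx
    rw [h2] at hdy
    obtain ⟨hdx1, hdx2⟩ := List.mem_filter.mp hdx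
    have hb1 := PySem.List.mem_pyRange_one.mp hdy
    have hb2 := PySem.List.mem_pyRange_one.mp hdx1
    simp only [Bool.not_eq_eq_eq_not, Bool.not_true, decide_eq_false_iff_not] at hdx2
    push Not at hdx2
    refine ⟨hb2.1, hb2.2, hb1.1, hb1.2, ?_⟩
    by_cases hc : |dx| = r
    · exact Or.inl hc
    · exact Or.inr (hdx2 hc)
  · rintro ⟨h1, h2, h3, h4, h5⟩
    apply List.mem_flatMap.mpr
    refine ⟨dy, PySem.List.mem_pyRange_one.mpr ⟨h3, h4⟩, ?_⟩
    apply List.mem_map.mpr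
    refine ⟨dx, List.mem_filter.mpr ⟨PySem.List.mem_pyRange_one.mpr ⟨h1, h2⟩, by
      simp only [Bool.not_eq_eq_eq_not, Bool.not_true, decide_eq_false_iff_not]
      push Not
      intro hc
      rcases h5 with h5 | h5
      · exact absurd h5 hc
      · exact h5⟩, rfl⟩

lemma pvKey_cov (m : Int) : ∀ o ∈ pvOffsets m, pvKey o ∈ PySem.List.pyRange 1 (m + 1) 1 := by
  rintro ⟨dx, dy⟩ ho
  obtain ⟨h1, h2, h3, h4, h5⟩ := (pvMem_offsets m dx dy).mp ho
  rw [PySem.List.mem_pyRange_one]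
  unfold pvKey
  simp only
  rcases abs_cases dx with ⟨e1, f1⟩ | ⟨e1, f1⟩ <;>
    rcases abs_cases dy with ⟨e2, f2⟩ | ⟨e2, f2⟩ <;>
    rcases max_cases |dx| |dy| with ⟨e3, f3⟩ | ⟨e3, f3⟩ <;>
    rw [e1, e2] at e3 f3 ⊢ <;> rw [e3] <;> omega

-- for 1 ≤ r ≤ m, the Chebyshev-r group of the flat offset list is A's ring-r perimeter
lemma pvGroup_eq_perim (m r : Int) (hr1 : 1 ≤ r) (hr2 : r ≤ m) :
    (pvOffsets m).filter (fun o => decide (pvKey o = r)) = pvPerimA r := by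
  apply pvEqOfMemPairwiseRel pvLex pvLex_asym
  · exact List.Pairwise.filter _ (pvPairwiseLex_offsets m)
  · exact pvPairwiseLex_perim r
  · rintro ⟨dx, dy⟩
    rw [List.mem_filter, pvMem_offsets, pvMem_perim]
    simp only [decide_eq_true_eq]
    unfold pvKey
    simp only
    constructor
    · rintro ⟨⟨h1, h2, h3, h4, h5⟩, hk⟩
      rcases abs_cases dx with ⟨e1, f1⟩ | ⟨e1, f1⟩ <;>
        rcases abs_cases dy with ⟨e2, f2⟩ | ⟨e2, f2⟩ <;>
        rcases max_cases |dx| |dy| with ⟨e3, f3⟩ | ⟨e3, f3⟩ <;>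
        rw [e1, e2] at e3 f3 hk <;> rw [e3] at hk <;>
        exact ⟨by omega, by omega, by omega, by omega, by rw [e1, e2]; omega⟩
    · rintro ⟨h1, h2, h3, h4, h5⟩
      rw [abs_eq (by omega), abs_eq (by omega)] at h5
      refine ⟨⟨by omega, by omega, by omega, by omega, by omega⟩, ?_⟩
      rcases abs_cases dx with ⟨e1, f1⟩ | ⟨e1, f1⟩ <;>
        rcases abs_cases dy with ⟨e2, f2⟩ | ⟨e2, f2⟩ <;>
        rcases max_cases |dx| |dy| with ⟨e3, f3⟩ | ⟨e3, f3⟩ <;>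
        rw [e1, e2] at e3 f3 ⊢ <;> rw [e3] <;> omega

-- the sorted flat list is exactly A's rings concatenated in radius order
lemma pvSorted_offsets (m : Int) :
    (pvOffsets m).mergeSort (fun o p => decide (max |o.1| |o.2| ≤ max |p.1| |p.2|)) =
      (PySem.List.pyRange 1 (m + 1) 1).flatMap pvPerimA := by
  rw [show (fun o p : Int × Int => decide (max |o.1| |o.2| ≤ max |p.1| |p.2|)) =
      (fun o p => decide (pvKey o ≤ pvKey p)) from rfl]
  rw [pvMergeSort_grouped pvKey (PySem.List.pyRange 1 (m + 1) 1)
    (PySem.List.pairwise_lt_pyRange_one 1 (m + 1)) (pvOffsets m) (pvKey_cov m)]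
  apply pvFlatMapCongr
  intro r hr
  have := PySem.List.mem_pyRange_one.mp hr
  exact pvGroup_eq_perim m r (by omega) (by omega)

-- the two ports as findSome? over lists of offsets -----------------------------

lemma pvALoop_eq (grid : List (List Int)) (x y : Int) :
    ∀ (fuel : Nat) (a : Int),
      pvALoop grid x y a fuel =
        (PySem.List.pyRange a (a + fuel) 1).findSome? (pvARing grid x y) := by
  intro fuel
  induction fuel with
  | zero => intro a; rw [PySem.List.pyRange_one_eq_nil (by omega)]; rfl
  | succ f ih =>
    intro a
    rw [PySem.List.pyRange_one_cons (by omega), List.findSome?_cons]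
    show (match pvARing grid x y a with
        | some p => some p
        | none => pvALoop grid x y (a + 1) f) = _
    rw [ih (a + 1)]
    have : a + 1 + (f : Int) = a + ((f : Int) + 1) := by omega
    rw [this]
    cases pvARing grid x y a with
    | some p => rfl
    | none => simp [Option.or]

lemma pvA_eq (grid : List (List Int)) (x y m : Int) :
    find_nearest_open_py grid x y m =
      ((PySem.List.pyRange 1 (m + 1) 1).flatMap pvPerimA).findSome? (pvCheck grid x y) := by
  unfold find_nearest_open_py
  rw [pvALoop_eq grid x y m.toNat 1]
  have hr : PySem.List.pyRange 1 (1 + (m.toNat : Int)) 1 = PySem.List.pyRange 1 (m + 1) 1 := by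
    by_cases hm : 0 ≤ m
    · have : 1 + (m.toNat : Int) = m + 1 := by omega
      rw [this]
    · rw [PySem.List.pyRange_one_eq_nil (by omega), PySem.List.pyRange_one_eq_nil (by omega)]
  rw [hr, pvFindSome?_flatMap]
  apply pvFindSome?_congr
  intro r _
  unfold pvARing pvPerimA
  rw [pvFindSome?_flatMap]
  apply pvFindSome?_congr
  intro dy _
  show (PySem.List.pyRange (-r) (r + 1) 1).findSome?
      (fun dx => if |dx| ≠ r ∧ |dy| ≠ r then none else pvCheck grid x y (dx, dy)) = _
  rw [pvFindSome?_if _ (fun dx => |dx| ≠ r ∧ |dy| ≠ r) (fun dx => pvCheck grid x y (dx, dy)),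
    List.findSome?_map]
  rfl

lemma pvB_eq (grid : List (List Int)) (x y m : Int) :
    find_nearest_open_py_alt grid x y m =
      ((pvOffsets m).mergeSort (fun o p => decide (max |o.1| |o.2| ≤ max |p.1| |p.2|))).findSome?
        (pvCheck grid x y) := rfl

-- ===== VERDICT (by name: the statement is the Claim_ definition above) =====
theorem find_nearest_open_py_spec : Claim_equal_find_nearest_open_py := by
  intro grid x y m _ _
  unfold Spec_find_nearest_open_py
  rw [pvA_eq, pvB_eq, pvSorted_offsets]
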